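-- pv_equiv track=rewrite | github.com/ntytctw-ops/IMC-trading-Prosperity- | Round3/Algo/Round3_4_17/round3_ultimate.py | total_volume_best_price_calc
-- ===== SOURCE A (Python) =====
-- def total_volume_best_price_calc(order_list, buy): # buy = 0 is sell order, buy = 1 is buy order
--     total_volume = 0
--     price_list = []
--     if buy == 0:
--         for price, quantity in order_list:
--             total_volume -= quantity
--             price_list.append(price)
--         return total_volume, min(price_list)
--     else:
--         for price, quantity in order_list:
--             total_volume += quantity
--             price_list.append(price)
--         return total_volume, max(price_list)
-- ===== SOURCE B (Python) =====
-- def total_volume_best_price_calc(order_list, buy): # buy = 0 is sell order, buy = 1 is buy order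
--     # One pass: running signed volume and running best price (min for sells, max for buys).
--     sign = -1 if buy == 0 else 1
--     total = 0
--     best = order_list[0][0]
--     for price, quantity in order_list:
--         total += sign * quantity
--         if (price < best) if buy == 0 else (price > best):
--             best = price
--     return total, best
-- ===== Notes on version B (the rewrite author's own statement) =====
-- stated objective: simpler
-- what changed: Single fused pass keeping a running signed volume and running extremal price instead of two phases (accumulate a price list, then scan it with min/max); no intermediate list is built.
import Mathlib
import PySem

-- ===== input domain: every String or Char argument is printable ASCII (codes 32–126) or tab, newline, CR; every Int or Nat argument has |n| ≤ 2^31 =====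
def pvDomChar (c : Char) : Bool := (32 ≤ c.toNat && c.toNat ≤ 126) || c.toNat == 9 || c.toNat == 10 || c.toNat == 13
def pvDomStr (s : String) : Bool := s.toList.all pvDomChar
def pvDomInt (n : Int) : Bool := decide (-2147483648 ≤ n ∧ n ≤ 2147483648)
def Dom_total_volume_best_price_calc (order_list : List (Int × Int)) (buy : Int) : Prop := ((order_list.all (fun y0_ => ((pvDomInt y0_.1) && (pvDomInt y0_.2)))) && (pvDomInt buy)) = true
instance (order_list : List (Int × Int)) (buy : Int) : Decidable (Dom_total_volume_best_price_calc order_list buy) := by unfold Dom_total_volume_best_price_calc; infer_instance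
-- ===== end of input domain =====

-- B fuses A's two phases (build a price list, then min/max it) into one pass with a
-- running signed volume and running extremal price; both raise on the empty list (excluded by Pre_).

-- ===== PORT A =====
def total_volume_best_price_calc (order_list : List (Int × Int)) (buy : Int) : Int × Int :=
  if buy == 0 then
    let total_volume := order_list.foldl (fun tv pq => tv - pq.2) 0
    let price_list := order_list.foldl (fun pl pq => pl ++ [pq.1]) ([] : List Int)
    -- min(price_list): Python raises ValueError on []; none is excluded by Pre_, .getD 0 is dead there
    (total_volume, (PySem.List.min? price_list (fun x => x)).getD 0)
  else
    let total_volume := order_list.foldl (fun tv pq => tv + pq.2) 0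
    let price_list := order_list.foldl (fun pl pq => pl ++ [pq.1]) ([] : List Int)
    (total_volume, (PySem.List.max? price_list (fun x => x)).getD 0)

-- ===== PORT B =====
def total_volume_best_price_calc_alt (order_list : List (Int × Int)) (buy : Int) : Int × Int :=
  match order_list with
  | [] => (0, 0)  -- Python B raises IndexError at order_list[0]; excluded by Pre_
  | (p0, _) :: _ =>
    let sign : Int := if buy == 0 then -1 else 1
    order_list.foldl
      (fun (acc : Int × Int) pq =>
        (acc.1 + sign * pq.2,
         if (if buy == 0 then pq.1 < acc.2 else pq.1 > acc.2) then pq.1 else acc.2))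
      (0, p0)

-- ===== PRECONDITION & SPEC =====
-- Pre_ excludes only the empty list, on which A raises ValueError (min/max of an empty sequence).
def Pre_total_volume_best_price_calc (order_list : List (Int × Int)) (buy : Int) : Prop :=
  order_list ≠ []
instance (order_list : List (Int × Int)) (buy : Int) : Decidable (Pre_total_volume_best_price_calc order_list buy) := by unfold Pre_total_volume_best_price_calc; infer_instance
def pvWitness_total_volume_best_price_calc : (List (Int × Int)) × Int := ([(10, 3), (9, 2)], 0)

def Spec_total_volume_best_price_calc (order_list : List (Int × Int)) (buy : Int) (out : Int × Int) : Prop := out = total_volume_best_price_calc_alt order_list buy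
instance (order_list : List (Int × Int)) (buy : Int) (out : Int × Int) : Decidable (Spec_total_volume_best_price_calc order_list buy out) := by unfold Spec_total_volume_best_price_calc; infer_instance

-- ===== CLAIM (what is proved, stated in full; the proofs are below) =====
def Claim_equal_total_volume_best_price_calc : Prop := ∀ (order_list : List (Int × Int)) (buy : Int), Dom_total_volume_best_price_calc order_list buy → Pre_total_volume_best_price_calc order_list buy → Spec_total_volume_best_price_calc order_list buy (total_volume_best_price_calc order_list buy)

-- ===== LEMMAS AND PROOFS =====

-- a fold whose step acts componentwise splits into two folds
theorem pv_foldl_pair (l : List (Int × Int)) (f : Int → Int × Int → Int) (g : Int → Int × Int → Int)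
    (a b : Int) :
    l.foldl (fun acc pq => (f acc.1 pq, g acc.2 pq)) (a, b) = (l.foldl f a, l.foldl g b) := by
  induction l generalizing a b with
  | nil => rfl
  | cons x t ih => simp [List.foldl, ih]

theorem pv_append_fold (l : List (Int × Int)) (init : List Int) :
    l.foldl (fun pl pq => pl ++ [pq.1]) init = init ++ l.map Prod.fst := by
  induction l generalizing init with
  | nil => simp
  | cons x t ih => simp [List.foldl, ih]

theorem pv_sub_fold (l : List (Int × Int)) (a : Int) :
    l.foldl (fun tv pq => tv - pq.2) a = l.foldl (fun tv pq => tv + (-1) * pq.2) a := by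
  induction l generalizing a with
  | nil => rfl
  | cons x t ih => simp only [List.foldl]; rw [ih]; ring_nf

theorem pv_add_fold (l : List (Int × Int)) (a : Int) :
    l.foldl (fun tv pq => tv + pq.2) a = l.foldl (fun tv pq => tv + 1 * pq.2) a := by
  induction l generalizing a with
  | nil => rfl
  | cons x t ih => simp only [List.foldl]; rw [ih]; ring_nf

theorem pv_min_fold (l : List (Int × Int)) (b : Int) :
    l.foldl (fun best pq => if pq.1 < best then pq.1 else best) b
      = (l.map Prod.fst).foldl min b := by
  induction l generalizing b with
  | nil => rfl
  | cons x t ih =>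
    simp only [List.map, List.foldl, ih]
    congr 1
    simp [min_def]; split_ifs <;> omega

theorem pv_max_fold (l : List (Int × Int)) (b : Int) :
    l.foldl (fun best pq => if pq.1 > best then pq.1 else best) b
      = (l.map Prod.fst).foldl max b := by
  induction l generalizing b with
  | nil => rfl
  | cons x t ih =>
    simp only [List.map, List.foldl, ih]
    congr 1
    simp [max_def]; split_ifs <;> omega

-- ===== VERDICT (by name: the statement is the Claim_ definition above) =====
theorem total_volume_best_price_calc_spec : Claim_equal_total_volume_best_price_calc := by
  intro order_list buy _ hpre
  unfold Spec_total_volume_best_price_calc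
  match order_list with
  | [] => exact absurd rfl hpre
  | (p0, q0) :: t =>
    unfold total_volume_best_price_calc total_volume_best_price_calc_alt
    by_cases hb : buy == 0
    · simp only [hb, if_pos]
      rw [pv_foldl_pair ((p0, q0) :: t) (fun a pq => a + (-1) * pq.2)
            (fun b pq => if pq.1 < b then pq.1 else b) 0 p0,
          pv_append_fold, pv_sub_fold]
      simp only [List.nil_append, List.map]
      rw [PySem.List.min?_id_cons]
      simp only [Option.getD_some]
      rw [pv_min_fold]
      simp [List.foldl]
    · simp only [hb, if_false, Bool.false_eq_true]
      rw [pv_foldl_pair ((p0, q0) :: t) (fun a pq => a + 1 * pq.2)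
            (fun b pq => if pq.1 > b then pq.1 else b) 0 p0,
          pv_append_fold, pv_add_fold]
      simp only [List.nil_append, List.map]
      rw [PySem.List.max?_id_cons]
      simp only [Option.getD_some]
      rw [pv_max_fold]
      simp [List.foldl]
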